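-- pv_equiv track=rewrite | github.com/laoyang103/iDigger | tshark/views.py | txt2html
-- ===== SOURCE A (Python) =====
-- def txt2html(txt):
--     def escape(txt):
--         txt = txt.replace('&','&#38;')
--         txt = txt.replace(' ','&#160;')
--         txt = txt.replace('<','&#60;')
--         txt = txt.replace('>','&#62;')
--         txt = txt.replace('"','&#34;')
--         txt = txt.replace('\'','&#39;')
--         return txt
--     txt = escape(txt)
--     lines = txt.split('\n')
--     for i, line in enumerate(lines):
--         lines[i] = '<p>' + line + '</p>'
--     txt = ''.join(lines)
--     return txt
-- ===== SOURCE B (Python) =====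
-- _TABLE = {'&': '&#38;', ' ': '&#160;', '<': '&#60;', '>': '&#62;',
--           '"': '&#34;', "'": '&#39;', '\n': '</p><p>'}
--
-- def txt2html(txt):
--     return '<p>' + ''.join(_TABLE.get(c, c) for c in txt) + '</p>'
-- ===== Notes on version B (the rewrite author's own statement) =====
-- stated objective: simpler
-- what changed: B replaces A's six sequential full-string replace passes plus the split/enumerate-loop/join by one table-driven pass: a dict maps each special character (including the newline, sent directly to a close-paragraph-open-paragraph pair) to its replacement, and a single join over the characters builds the body, wrapped once in the outer paragraph tags.
import Mathlib
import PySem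

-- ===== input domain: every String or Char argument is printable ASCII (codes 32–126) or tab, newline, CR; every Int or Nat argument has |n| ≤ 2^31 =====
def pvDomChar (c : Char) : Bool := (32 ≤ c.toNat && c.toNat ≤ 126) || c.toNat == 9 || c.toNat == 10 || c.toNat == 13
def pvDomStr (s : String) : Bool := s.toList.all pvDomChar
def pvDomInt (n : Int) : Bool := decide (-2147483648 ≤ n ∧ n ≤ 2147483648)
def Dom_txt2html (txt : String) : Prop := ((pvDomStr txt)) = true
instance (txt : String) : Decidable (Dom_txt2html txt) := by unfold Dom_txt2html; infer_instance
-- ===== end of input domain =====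

-- B replaces A's six full-string replace passes + split/loop/join by one table-driven pass (simpler; same result).

-- ===== PORT A =====
-- nested helper 'escape': six sequential str.replace calls
def escapeA (s : List Char) : List Char :=
  let s := PySem.Chars.replace s "&".toList "&#38;".toList
  let s := PySem.Chars.replace s " ".toList "&#160;".toList
  let s := PySem.Chars.replace s "<".toList "&#60;".toList
  let s := PySem.Chars.replace s ">".toList "&#62;".toList
  let s := PySem.Chars.replace s "\"".toList "&#34;".toList
  let s := PySem.Chars.replace s "'".toList "&#39;".toList
  s

def txt2html (txt : String) : String :=
  let s := escapeA txt.toList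
  let lines := PySem.Chars.splitOn s "\n".toList
  -- for i, line in enumerate(lines): lines[i] = '<p>' + line + '</p>'
  let lines := (PySem.List.enumerate lines 0).foldl
      (fun ls p => PySem.List.pySetD ls p.1 ("<p>".toList ++ p.2 ++ "</p>".toList)) lines
  String.ofList (PySem.Chars.join [] lines)

-- ===== PORT B =====
-- the translation table _TABLE, as a lookup function (dict.get(c, c))
def tabB (c : Char) : List Char :=
  if c = '&' then "&#38;".toList
  else if c = ' ' then "&#160;".toList
  else if c = '<' then "&#60;".toList
  else if c = '>' then "&#62;".toList
  else if c = '"' then "&#34;".toList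
  else if c = '\'' then "&#39;".toList
  else if c = '\n' then "</p><p>".toList
  else [c]

def txt2html_alt (txt : String) : String :=
  String.ofList ("<p>".toList ++ txt.toList.flatMap tabB ++ "</p>".toList)

-- ===== PRECONDITION & SPEC =====
def Spec_txt2html (txt : String) (out : String) : Prop := out = txt2html_alt txt
instance (txt : String) (out : String) : Decidable (Spec_txt2html txt out) := by unfold Spec_txt2html; infer_instance

-- ===== CLAIM (what is proved, stated in full; the proofs are below) =====
def Claim_equal_txt2html : Prop := ∀ (txt : String), Dom_txt2html txt → Spec_txt2html txt (txt2html txt)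

-- ===== LEMMAS AND PROOFS =====

-- single-character replacement map used to describe one str.replace pass
def repl1 (c : Char) (r : List Char) (x : Char) : List Char := if x = c then r else [x]

-- newline map for the paragraph wrapping
def nlF (x : Char) : List Char := if x = '\n' then "</p><p>".toList else [x]

-- wrapping one line
def wrapP (l : List Char) : List Char := "<p>".toList ++ l ++ "</p>".toList

-- lines of l given an already-read prefix pre of the current line
def splitNl (pre : List Char) : List Char → List (List Char)
  | [] => [pre]
  | c :: t => if c = '\n' then pre :: splitNl [] t else splitNl (pre ++ [c]) t

theorem replace_go_single (c : Char) (r : List Char) :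
    ∀ (fuel : Nat) (l acc : List Char), l.length ≤ fuel →
      PySem.Chars.replace.go [c] r fuel l acc = acc.reverse ++ l.flatMap (repl1 c r) := by
  intro fuel
  induction fuel with
  | zero =>
    intro l acc h
    cases l with
    | nil => simp [PySem.Chars.replace.go]
    | cons x t => simp at h
  | succ n ih =>
    intro l acc h
    cases l with
    | nil => simp [PySem.Chars.replace.go]
    | cons x t =>
      rw [PySem.Chars.replace.go]
      by_cases hx : x = c
      · subst hx
        have hp : List.isPrefixOf [x] (x :: t) = true := by simp [List.isPrefixOf]
        simp only [hp, if_true, List.length_cons, List.length_nil, List.drop_succ_cons,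
          List.drop_zero]
        rw [ih t (r.reverse ++ acc) (by simpa using Nat.le_of_succ_le_succ h)]
        simp [repl1]
      · have hp : List.isPrefixOf [c] (x :: t) = false := by
          simp [List.isPrefixOf]; exact fun hcx => absurd hcx.symm hx
        simp only [hp, if_false, Bool.false_eq_true]
        rw [ih t (x :: acc) (by simpa using Nat.le_of_succ_le_succ h)]
        simp [repl1, hx]

theorem replace_single (s : List Char) (c : Char) (r : List Char) :
    PySem.Chars.replace s [c] r = s.flatMap (repl1 c r) := by
  rw [PySem.Chars.replace]
  simp only [List.isEmpty_cons, Bool.false_eq_true, if_false]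
  simpa using replace_go_single c r s.length s [] (le_refl _)

theorem splitOn_go_nl :
    ∀ (fuel : Nat) (l cur : List Char) (acc : List (List Char)), l.length < fuel →
      PySem.Chars.splitOn.go ['\n'] fuel l cur acc = acc.reverse ++ splitNl cur.reverse l := by
  intro fuel
  induction fuel with
  | zero => intro l cur acc h; exact absurd h (Nat.not_lt_zero _)
  | succ n ih =>
    intro l cur acc h
    cases l with
    | nil => simp [PySem.Chars.splitOn.go, splitNl]
    | cons x t =>
      rw [PySem.Chars.splitOn.go]
      by_cases hx : x = '\n'
      · subst hx
        have hp : List.isPrefixOf ['\n'] ('\n' :: t) = true := by simp [List.isPrefixOf]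
        simp only [hp, if_true, List.length_cons, List.length_nil, List.drop_succ_cons,
          List.drop_zero]
        rw [ih t [] (cur.reverse :: acc) (by simpa using Nat.lt_of_succ_lt_succ h)]
        simp [splitNl]
      · have hp : List.isPrefixOf ['\n'] (x :: t) = false := by
          simp [List.isPrefixOf]; exact fun hcx => absurd hcx.symm hx
        simp only [hp, if_false, Bool.false_eq_true]
        rw [ih t (x :: cur) acc (by simpa using Nat.lt_of_succ_lt_succ h)]
        simp [splitNl, hx]

theorem splitOn_nl (s : List Char) :
    PySem.Chars.splitOn s ['\n'] = splitNl [] s := by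
  rw [PySem.Chars.splitOn]
  simpa using splitOn_go_nl (s.length + 1) s [] [] (by omega)

theorem join_nil_cons (x : List Char) (ys : List (List Char)) :
    PySem.Chars.join [] (x :: ys) = x ++ PySem.Chars.join [] ys := by
  cases ys with
  | nil => simp [PySem.Chars.join, List.intercalate]
  | cons y t => simp [PySem.Chars.join, List.intercalate]

theorem join_wrap_splitNl :
    ∀ (l pre : List Char),
      PySem.Chars.join [] ((splitNl pre l).map wrapP)
        = "<p>".toList ++ pre ++ l.flatMap nlF ++ "</p>".toList := by
  intro l
  induction l with
  | nil => intro pre; simp [splitNl, PySem.Chars.join, List.intercalate, wrapP]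
  | cons x t ih =>
    intro pre
    by_cases hx : x = '\n'
    · subst hx
      simp only [splitNl, if_true, List.map_cons]
      rw [join_nil_cons, ih []]
      simp [wrapP, nlF]
    · simp only [splitNl, hx, if_false]
      rw [ih (pre ++ [x])]
      simp [nlF, hx]

-- the enumerate/set loop writes each index once: it is map
theorem enum_fold_set {α : Type} (w : α → α) :
    ∀ (l A B : List α), B.length = l.length →
      (PySem.List.enumerate l (A.length : Int)).foldl
          (fun ls p => PySem.List.pySetD ls p.1 (w p.2)) (A ++ B)
        = A ++ l.map w := by
  intro l
  induction l with
  | nil => intro A B h; simp [PySem.List.enumerate, List.length_eq_zero_iff.mp h]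
  | cons x t ih =>
    intro A B h
    cases B with
    | nil => simp at h
    | cons b B' =>
      rw [PySem.List.enumerate_cons, List.foldl_cons]
      have hset : PySem.List.pySetD (A ++ b :: B') (A.length : Int) (w x)
          = A ++ w x :: B' := by
        rw [PySem.List.pySetD_natCast]; simp
      have hcast : (A.length : Int) + 1 = (((A ++ [w x]).length : Nat) : Int) := by
        push_cast [List.length_append, List.length_cons, List.length_nil]; ring
      rw [hset, hcast]
      have hAB : A ++ w x :: B' = (A ++ [w x]) ++ B' := by simp
      rw [hAB, ih (A ++ [w x]) B' (by simpa using h)]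
      simp

-- escaping then newline mapping, character by character, is B's table
theorem chain_eq (c : Char) :
    (repl1 '&' "&#38;".toList c).flatMap (fun x => (repl1 ' ' "&#160;".toList x).flatMap
      (fun x => (repl1 '<' "&#60;".toList x).flatMap (fun x => (repl1 '>' "&#62;".toList x).flatMap
        (fun x => (repl1 '"' "&#34;".toList x).flatMap
          (fun x => (repl1 '\'' "&#39;".toList x).flatMap nlF)))))
      = tabB c := by
  by_cases h1 : c = '&'; · subst h1; decide
  by_cases h2 : c = ' '; · subst h2; decide
  by_cases h3 : c = '<'; · subst h3; decide
  by_cases h4 : c = '>'; · subst h4; decide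
  by_cases h5 : c = '"'; · subst h5; decide
  by_cases h6 : c = '\''; · subst h6; decide
  by_cases h7 : c = '\n'
  · subst h7; decide
  · simp [repl1, nlF, tabB, h1, h2, h3, h4, h5, h6, h7]

theorem escapeA_flatMap (s : List Char) :
    (escapeA s).flatMap nlF = s.flatMap tabB := by
  show (PySem.Chars.replace (PySem.Chars.replace (PySem.Chars.replace (PySem.Chars.replace
      (PySem.Chars.replace (PySem.Chars.replace s "&".toList "&#38;".toList)
        " ".toList "&#160;".toList) "<".toList "&#60;".toList) ">".toList "&#62;".toList)
      "\"".toList "&#34;".toList) "'".toList "&#39;".toList).flatMap nlF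
    = s.flatMap tabB
  have h1 : "&".toList = ['&'] := by decide
  have h2 : " ".toList = [' '] := by decide
  have h3 : "<".toList = ['<'] := by decide
  have h4 : ">".toList = ['>'] := by decide
  have h5 : "\"".toList = ['"'] := by decide
  have h6 : "'".toList = ['\''] := by decide
  rw [h1, h2, h3, h4, h5, h6]
  rw [replace_single, replace_single, replace_single, replace_single, replace_single,
      replace_single]
  simp only [List.flatMap_assoc]
  exact List.flatMap_congr (fun c _ => chain_eq c)

-- ===== VERDICT (by name: the statement is the Claim_ definition above) =====
theorem txt2html_spec : Claim_equal_txt2html := by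
  intro txt _
  unfold Spec_txt2html
  show String.ofList (PySem.Chars.join []
      ((PySem.List.enumerate (PySem.Chars.splitOn (escapeA txt.toList) "\n".toList) 0).foldl
        (fun ls p => PySem.List.pySetD ls p.1 ("<p>".toList ++ p.2 ++ "</p>".toList))
        (PySem.Chars.splitOn (escapeA txt.toList) "\n".toList)))
    = String.ofList ("<p>".toList ++ txt.toList.flatMap tabB ++ "</p>".toList)
  have hn : "\n".toList = ['\n'] := by decide
  rw [hn, splitOn_nl]
  have hmap :
      (PySem.List.enumerate (splitNl [] (escapeA txt.toList)) 0).foldl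
          (fun ls p => PySem.List.pySetD ls p.1 ("<p>".toList ++ p.2 ++ "</p>".toList))
          (splitNl [] (escapeA txt.toList))
        = (splitNl [] (escapeA txt.toList)).map wrapP := by
    have := enum_fold_set wrapP (splitNl [] (escapeA txt.toList)) []
      (splitNl [] (escapeA txt.toList)) rfl
    simpa [wrapP] using this
  rw [hmap, join_wrap_splitNl, escapeA_flatMap]
  simp
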